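-- pv_equiv track=rewrite | github.com/pgrady1322/strandweaver | strandweaver/assembly_utils/iterative_polisher.py | _build_kmer_index
-- ===== SOURCE A (Python) =====
-- from collections import Counter, defaultdict
-- from typing import Any, Dict, List, Optional, Tuple
--
-- def _build_kmer_index(sequence: str, k: int) -> Dict[str, List[int]]:
--     """Build a dict mapping each k-mer in *sequence* to its start positions."""
--     index: Dict[str, List[int]] = defaultdict(list)
--     seq_upper = sequence.upper()
--     for i in range(len(seq_upper) - k + 1):
--         kmer = seq_upper[i:i + k]
--         if 'N' not in kmer:
--             index[kmer].append(i)
--     return index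
-- ===== SOURCE B (Python) =====
-- from collections import defaultdict
--
--
-- def _build_kmer_index(sequence, k):
--     """Build a dict mapping each k-mer in *sequence* to its start positions.
--
--     Single pass over the characters: track the index of the most recent 'N';
--     the window ending at position ``end`` is N-free exactly when its start is
--     beyond that index, so no window is ever re-scanned for 'N'.
--     """
--     index = defaultdict(list)
--     if k < 1:
--         return index
--     seq_upper = sequence.upper()
--     last_n = -1
--     for end, ch in enumerate(seq_upper):
--         if ch == 'N':
--             last_n = end
--         start = end - k + 1
--         if start > last_n:
--             index[seq_upper[start:end + 1]].append(start)
--     return index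
-- ===== Notes on version B (the rewrite author's own statement) =====
-- stated objective: alternative
-- what changed: Instead of slicing every window and re-scanning it for 'N', B makes a single pass over the characters tracking the index of the most recent 'N' and emits a window exactly when its start lies beyond that index; B also restricts to k >= 1: Pre_ excludes k <= 0, which lies outside the natural domain of a k-mer size (there A maps every position to the empty string, B returns an empty index).
-- outside the precondition, e.g. on _build_kmer_index('AC', 0): A returns {'': [0, 1, 2]}, B returns {}
import Mathlib
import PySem

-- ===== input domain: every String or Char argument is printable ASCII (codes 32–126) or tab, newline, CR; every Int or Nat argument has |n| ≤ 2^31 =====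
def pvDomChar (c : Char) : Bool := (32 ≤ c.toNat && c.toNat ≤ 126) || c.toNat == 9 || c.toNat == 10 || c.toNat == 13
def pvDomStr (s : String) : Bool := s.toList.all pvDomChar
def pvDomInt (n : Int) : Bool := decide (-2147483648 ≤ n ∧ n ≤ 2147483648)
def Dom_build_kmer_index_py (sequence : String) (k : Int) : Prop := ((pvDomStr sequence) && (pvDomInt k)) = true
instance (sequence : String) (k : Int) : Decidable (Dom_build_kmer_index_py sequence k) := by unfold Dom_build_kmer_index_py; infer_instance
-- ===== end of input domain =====

-- B replaces A's per-window 'N' re-scan by a single pass that tracks the index of the last 'N'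
-- seen (alternative decomposition, same exact result on Pre_, i.e. for k ≥ 1).


-- ===== PORT A =====
def build_kmer_index_py (sequence : String) (k : Int) : List (String × List Int) :=
  let seq_upper := PySem.Str.upper sequence
  let index : PySem.Dict String (List Int) :=
    (PySem.List.pyRange 0 (PySem.Str.len seq_upper - k + 1) 1).foldl
      (fun index i =>
        let kmer := PySem.Str.slice seq_upper (some i) (some (i + k))
        if PySem.Str.isIn "N" kmer = false then
          index.modify kmer [] (· ++ [i])
        else index)
      PySem.Dict.empty
  index.items

-- ===== PORT B =====
def build_kmer_index_py_alt (sequence : String) (k : Int) : List (String × List Int) :=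
  if k < 1 then (PySem.Dict.empty : PySem.Dict String (List Int)).items
  else
    let seq_upper := PySem.Str.upper sequence
    let st :=
      (PySem.List.enumerate seq_upper.toList 0).foldl
        (fun (st : Int × PySem.Dict String (List Int)) p =>
          let last_n := if p.2 == 'N' then p.1 else st.1
          let start := p.1 - k + 1
          if start > last_n then
            (last_n,
             st.2.modify (PySem.Str.slice seq_upper (some start) (some (p.1 + 1))) []
               (· ++ [start]))
          else (last_n, st.2))
        (-1, PySem.Dict.empty)
    st.2.items

-- ===== PRECONDITION & SPEC =====
-- Pre_ excludes k ≤ 0 (on which A still returns): a k-mer size is positive by definition, so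
-- these inputs lie outside the task's natural domain; B's algorithm is for positive k only.
def Pre_build_kmer_index_py (sequence : String) (k : Int) : Prop := 1 ≤ k
instance (sequence : String) (k : Int) : Decidable (Pre_build_kmer_index_py sequence k) := by unfold Pre_build_kmer_index_py; infer_instance
def pvWitness_build_kmer_index_py : String × Int := ("ACGTNACA", 3)
def Spec_build_kmer_index_py (sequence : String) (k : Int) (out : List (String × List Int)) : Prop := out = build_kmer_index_py_alt sequence k
instance (sequence : String) (k : Int) (out : List (String × List Int)) : Decidable (Spec_build_kmer_index_py sequence k out) := by unfold Spec_build_kmer_index_py; infer_instance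

-- ===== CLAIM (what is proved, stated in full; the proofs are below) =====
def Claim_equal_build_kmer_index_py : Prop := ∀ (sequence : String) (k : Int), Dom_build_kmer_index_py sequence k → Pre_build_kmer_index_py sequence k → Spec_build_kmer_index_py sequence k (build_kmer_index_py sequence k)

-- ===== LEMMAS AND PROOFS =====

-- the k-mer string starting at i (both ports compute exactly this slice)
def pvKey (s : String) (k' : Nat) (i : Nat) : String :=
  PySem.Str.slice s (some (i : Int)) (some ((i : Int) + (k' : Int)))

-- the dict operation both ports perform when the window starting at i is emitted
def pvG (s : String) (k' : Nat) (d : PySem.Dict String (List Int)) (i : Nat) :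
    PySem.Dict String (List Int) :=
  d.modify (pvKey s k' i) [] (· ++ [(i : Int)])

-- A's emission test ('N' not in the window), as a predicate on the start position
def pvP (s : String) (k' : Nat) (i : Nat) : Bool := !(PySem.Str.isIn "N" (pvKey s k' i))

-- index of the last 'N' in cs (-1 if none), exactly as B's loop maintains it
def pvLastN (cs : List Char) : Int :=
  (PySem.List.enumerate cs 0).foldl (fun a p => if p.2 == 'N' then p.1 else a) (-1)

-- B's loop body, with k = k'
def pvStep (s : String) (k' : Nat) (st : Int × PySem.Dict String (List Int)) (p : Int × Char) :
    Int × PySem.Dict String (List Int) :=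
  let last_n := if p.2 == 'N' then p.1 else st.1
  let start := p.1 - (k' : Int) + 1
  if start > last_n then
    (last_n, st.2.modify (PySem.Str.slice s (some start) (some (p.1 + 1))) [] (· ++ [start]))
  else (last_n, st.2)

theorem pvLastN_append_singleton (cs : List Char) (c : Char) :
    pvLastN (cs ++ [c]) = if c == 'N' then (cs.length : Int) else pvLastN cs := by
  simp [pvLastN, PySem.List.enumerate_append, PySem.List.enumerate_cons,
    PySem.List.enumerate_nil, List.foldl_append]

theorem pvLastN_lb (cs : List Char) : -1 ≤ pvLastN cs := by
  induction cs using List.reverseRecOn with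
  | nil => simp [pvLastN]
  | append_singleton cs c ih =>
    rw [pvLastN_append_singleton]
    split <;> omega

theorem pvLastN_lt_iff (cs : List Char) (i : Nat) :
    pvLastN cs < (i : Int) ↔ ∀ j, (hj : j < cs.length) → i ≤ j → cs[j] ≠ 'N' := by
  induction cs using List.reverseRecOn with
  | nil => simp [pvLastN]; omega
  | append_singleton cs c ih =>
    rw [pvLastN_append_singleton]
    by_cases hc : c = 'N'
    · subst hc
      simp only [beq_self_eq_true, if_true]
      constructor
      · intro h j hj hij
        simp only [List.length_append, List.length_singleton] at hj
        omega
      · intro h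
        by_contra hlt
        push_neg at hlt
        have hi : i ≤ cs.length := by exact_mod_cast hlt
        exact h cs.length (by simp) hi (by simp)
    · rw [if_neg (by simp [hc])]
      rw [ih]
      constructor
      · intro h j hj hij
        simp only [List.length_append, List.length_singleton] at hj
        rcases Nat.lt_succ_iff_lt_or_eq.mp hj with h' | h'
        · have := h j h' hij
          rwa [List.getElem_append_left h']
        · subst h'
          rw [List.getElem_append_right (by omega)]
          simpa using hc
      · intro h j hj hij
        have := h j (by simp; omega) hij
        rwa [List.getElem_append_left hj] at this

theorem pv_singleton_infix {c : Char} {l : List Char} : [c] <:+: l ↔ c ∈ l := by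
  constructor
  · intro h
    exact (List.singleton_sublist).mp h.sublist
  · intro h
    obtain ⟨s, t, rfl⟩ := List.append_of_mem h
    exact ⟨s, t, by simp⟩

theorem pvKey_toList (s : String) (k' i : Nat) :
    (pvKey s k' i).toList = (s.toList.drop i).take k' := by
  simp [pvKey, PySem.Str.toList_slice, PySem.List.slice_natCast_add]

theorem pvP_iff (s : String) (k' i : Nat) (h : i + k' ≤ s.toList.length) :
    pvP s k' i = true ↔ ∀ j, (hj : j < s.toList.length) → i ≤ j → j < i + k' → s.toList[j] ≠ 'N' := by
  rw [pvP, Bool.not_eq_true', ← Bool.not_eq_true, PySem.Str.isIn_iff_infix]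
  rw [show ("N" : String).toList = ['N'] from rfl, pvKey_toList, pv_singleton_infix]
  rw [List.mem_iff_getElem]
  constructor
  · intro hno j hj hij hjk
    intro hN
    apply hno
    refine ⟨j - i, by simp only [List.length_take, List.length_drop]; omega, ?_⟩
    simp only [List.getElem_take, List.getElem_drop, Nat.add_sub_cancel' hij]
    exact hN
  · rintro hall ⟨jj, hjj, hN⟩
    rw [List.getElem_take, List.getElem_drop] at hN
    simp only [List.length_take, List.length_drop] at hjj
    exact hall (i + jj) (by omega) (by omega) (by omega) hN

theorem pvP_iff_lastN (s : String) (k' i : Nat) (h : i + k' ≤ s.toList.length) :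
    pvP s k' i = true ↔ pvLastN (s.toList.take (i + k')) < (i : Int) := by
  rw [pvP_iff s k' i h, pvLastN_lt_iff]
  constructor
  · intro hall j hj hij
    simp only [List.length_take] at hj
    simp only [List.getElem_take]
    exact hall j (by omega) hij (by omega)
  · intro hall j hj hij hjk
    have := hall j (by simp only [List.length_take]; omega) hij
    simpa only [List.getElem_take] using this

theorem pvB_loop (s : String) (k' : Nat) (hk : 1 ≤ k') (m : Nat) (hm : m ≤ s.toList.length) :
    (PySem.List.enumerate (s.toList.take m) 0).foldl (pvStep s k') (-1, PySem.Dict.empty)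
      = (pvLastN (s.toList.take m),
         ((List.range (m + 1 - k')).filter (pvP s k')).foldl (pvG s k') PySem.Dict.empty) := by
  induction m with
  | zero =>
    simp [PySem.List.enumerate_nil, pvLastN, Nat.sub_eq_zero_of_le hk]
  | succ m ih =>
    have hmn : m < s.toList.length := by omega
    have htake : s.toList.take (m + 1) = s.toList.take m ++ [s.toList[m]] := by
      rw [List.take_succ, List.getElem?_eq_getElem hmn]
      rfl
    have hlen : (s.toList.take m).length = m := by rw [List.length_take]; omega
    have hlast : pvLastN (s.toList.take (m + 1))
        = if s.toList[m] == 'N' then (m : Int) else pvLastN (s.toList.take m) := by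
      rw [htake, pvLastN_append_singleton, hlen]
    rw [htake, PySem.List.enumerate_append, List.foldl_append, ih (by omega), hlen]
    rw [PySem.List.enumerate_cons, PySem.List.enumerate_nil]
    simp only [List.foldl_cons, List.foldl_nil]
    rw [show ((0 : Int) + (m : Nat)) = (m : Int) by push_cast; ring]
    by_cases hcase : k' ≤ m + 1
    · -- the window ending at m starts at i = m + 1 - k' ≥ 0
      set i : Nat := m + 1 - k' with hi
      have hstart : (m : Int) - (k' : Int) + 1 = (i : Int) := by
        rw [hi]; push_cast; omega
      have hik : i + k' = m + 1 := by omega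
      have hcond : ((m : Int) - (k' : Int) + 1 > (if s.toList[m] == 'N' then (m : Int) else pvLastN (s.toList.take m)))
          ↔ pvP s k' i = true := by
        rw [← hlast, hstart, pvP_iff_lastN s k' i (by omega), hik]
      have hrange : m + 1 + 1 - k' = i + 1 := by omega
      rw [hrange, List.range_succ, List.filter_append, List.foldl_append]
      simp only [List.filter_cons, List.filter_nil]
      by_cases hp : pvP s k' i = true
      · have hkey : PySem.Str.slice s (some (i : Int)) (some ((m : Int) + 1)) = pvKey s k' i := by
          rw [pvKey, show ((i : Int) + (k' : Int)) = (m : Int) + 1 by omega]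
        rw [pvStep]
        simp only [hp, if_true]
        rw [if_pos (hcond.mpr hp)]
        refine Prod.ext (by simp [hlast]) ?_
        simp only [List.foldl_cons, List.foldl_nil]
        rw [hstart, hkey, pvG]
      · rw [pvStep]
        simp only [hp, if_false]
        rw [if_neg (fun h => hp (hcond.mp h))]
        exact Prod.ext (by simp [hlast]) (by simp)
    · -- m + 1 < k': no window fits yet
      have h1 : m + 1 - k' = 0 := by omega
      have h2 : m + 1 + 1 - k' = 0 := by omega
      rw [h1, h2]
      rw [pvStep]
      have hlb := pvLastN_lb (s.toList.take m)
      rw [if_neg (by split <;> omega)]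
      exact Prod.ext (by simp [hlast]) (by simp)

theorem pvA_eq (sequence : String) (k' : Nat) (hk : 1 ≤ k') :
    build_kmer_index_py sequence (k' : Int)
      = (((List.range ((PySem.Str.upper sequence).toList.length + 1 - k')).filter
            (pvP (PySem.Str.upper sequence) k')).foldl (pvG (PySem.Str.upper sequence) k')
          PySem.Dict.empty).items := by
  unfold build_kmer_index_py
  dsimp only
  set s := PySem.Str.upper sequence with hs
  congr 1
  have hr : PySem.List.pyRange 0 (PySem.Str.len s - (k' : Int) + 1) 1
      = (List.range (s.toList.length + 1 - k')).map (fun j : Nat => (j : Int)) := by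
    rw [PySem.List.pyRange_one]
    rw [show ((PySem.Str.len s - (k' : Int) + 1) - 0).toNat = s.toList.length + 1 - k' by
      simp only [PySem.Str.len_eq]; omega]
    exact List.map_congr_left (fun j _ => by simp)
  rw [hr, List.foldl_map]
  have hfun : (fun (x : PySem.Dict String (List Int)) (y : Nat) =>
      if PySem.Str.isIn "N" (PySem.Str.slice s (some (y : Int)) (some ((y : Int) + (k' : Int)))) = false then
        x.modify (PySem.Str.slice s (some (y : Int)) (some ((y : Int) + (k' : Int)))) [] (fun l => l ++ [(y : Int)])
      else x)
      = (fun (x : PySem.Dict String (List Int)) (y : Nat) => if pvP s k' y = true then pvG s k' x y else x) := by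
    funext x y
    rw [pvP, pvG, pvKey]
    cases h : PySem.Str.isIn "N" (PySem.Str.slice s (some (y : Int)) (some ((y : Int) + (k' : Int)))) <;>
      simp [h]
  rw [hfun, ← List.foldl_filter]

theorem pvB_eq (sequence : String) (k' : Nat) (hk : 1 ≤ k') :
    build_kmer_index_py_alt sequence (k' : Int)
      = (((List.range ((PySem.Str.upper sequence).toList.length + 1 - k')).filter
            (pvP (PySem.Str.upper sequence) k')).foldl (pvG (PySem.Str.upper sequence) k')
          PySem.Dict.empty).items := by
  unfold build_kmer_index_py_alt
  rw [if_neg (by push_cast; omega)]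
  dsimp only
  set s := PySem.Str.upper sequence with hs
  have hstep : (fun (st : Int × PySem.Dict String (List Int)) (p : Int × Char) =>
      let last_n := if p.2 == 'N' then p.1 else st.1
      let start := p.1 - (k' : Int) + 1
      if start > last_n then
        (last_n, st.2.modify (PySem.Str.slice s (some start) (some (p.1 + 1))) [] (· ++ [start]))
      else (last_n, st.2)) = pvStep s k' := rfl
  rw [hstep]
  rw [show s.toList = s.toList.take s.toList.length from (List.take_length).symm]
  rw [pvB_loop s k' hk s.toList.length (by simp)]
  simp

-- ===== VERDICT (by name: the statement is the Claim_ definition above) =====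
theorem build_kmer_index_py_spec : Claim_equal_build_kmer_index_py := by
  intro sequence k _ hpre
  unfold Pre_build_kmer_index_py at hpre
  obtain ⟨k', rfl⟩ : ∃ k' : Nat, k = (k' : Int) := ⟨k.toNat, by omega⟩
  have hk : 1 ≤ k' := by exact_mod_cast hpre
  unfold Spec_build_kmer_index_py
  rw [pvA_eq sequence k' hk, pvB_eq sequence k' hk]
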